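-- pv_equiv track=rewrite | github.com/biomed-AI/SANGO | utils_unknown.py | curate_celltype_names
-- ===== SOURCE A (Python) =====
-- def curate_celltype_names(l, atlas):
--     """
--     Return a list with curated cell type based on the reference atlas
--     """
--     if atlas == "PBMC":
--         l_new = [ 'Naive CD4 T' if i == 'Naive Treg' else i for i in l]
--         l_new = [ 'NK' if i == 'Mature NK' or (i=='Immature NK') else i for i in l_new]
--
--     elif atlas == "HealthyAdult":
--         curated_major = []
--         for i in l:
--             if i == "B Lymphocyte":
--                 curated_major.append("Immune Cells")
--             elif i == "T Lymphocyte":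
--                 curated_major.append("Immune Cells")
--             elif i == 'Myeloid / Macrophage':
--                 curated_major.append("Immune Cells")
--             else: curated_major.append(i)
--         l_new = curated_major
--
--     elif atlas == "TIL":
--         l_new = l
--         #todo: merge NK1 and NK2
--     else:
--         l_new = l
--     return l_new
-- ===== SOURCE B (Python) =====
-- # One flat rule table (atlas, old_name, new_name); rules for the requested atlas
-- # are applied one at a time by rewriting matching positions in a copy of l.
-- _RENAME_RULES = [
--     ("PBMC", "Naive Treg", "Naive CD4 T"),
--     ("PBMC", "Mature NK", "NK"),
--     ("PBMC", "Immature NK", "NK"),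
--     ("HealthyAdult", "B Lymphocyte", "Immune Cells"),
--     ("HealthyAdult", "T Lymphocyte", "Immune Cells"),
--     ("HealthyAdult", "Myeloid / Macrophage", "Immune Cells"),
-- ]
--
--
-- def curate_celltype_names(l, atlas):
--     rules = [(old, new) for a, old, new in _RENAME_RULES if a == atlas]
--     if not rules:
--         return l
--     out = list(l)
--     for old, new in rules:
--         for idx, v in enumerate(out):
--             if v == old:
--                 out[idx] = new
--     return out
-- ===== Notes on version B (the rewrite author's own statement) =====
-- stated objective: alternative
-- what changed: Replaces A's per-atlas element-wise branch chains with a flat (atlas, old, new) rule table traversed rule-major: each applicable rule rewrites matching positions of a working copy by index assignment; atlases with no rules return l itself.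
import Mathlib
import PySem

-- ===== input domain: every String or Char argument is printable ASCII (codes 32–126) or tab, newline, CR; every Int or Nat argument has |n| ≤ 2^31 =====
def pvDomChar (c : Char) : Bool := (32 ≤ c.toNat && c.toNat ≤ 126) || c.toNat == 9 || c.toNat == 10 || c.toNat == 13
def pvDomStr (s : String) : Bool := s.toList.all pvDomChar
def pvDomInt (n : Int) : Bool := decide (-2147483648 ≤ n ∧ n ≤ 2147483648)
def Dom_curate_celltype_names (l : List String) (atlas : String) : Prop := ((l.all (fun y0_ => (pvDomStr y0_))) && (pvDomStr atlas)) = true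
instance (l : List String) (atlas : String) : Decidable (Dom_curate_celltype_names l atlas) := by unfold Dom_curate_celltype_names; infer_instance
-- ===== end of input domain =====

-- B replaces A's per-atlas element-wise branch chains with a flat (atlas, old, new) rule table,
-- applied rule-major by index assignment on a working copy (objective: alternative).

-- ===== PORT A =====
def curate_celltype_names (l : List String) (atlas : String) : List String :=
  if atlas == "PBMC" then
    let l_new := l.map (fun i => if i == "Naive Treg" then "Naive CD4 T" else i)
    l_new.map (fun i => if i == "Mature NK" || i == "Immature NK" then "NK" else i)
  else if atlas == "HealthyAdult" then
    l.foldl (fun curated_major i =>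
      if i == "B Lymphocyte" then curated_major ++ ["Immune Cells"]
      else if i == "T Lymphocyte" then curated_major ++ ["Immune Cells"]
      else if i == "Myeloid / Macrophage" then curated_major ++ ["Immune Cells"]
      else curated_major ++ [i]) []
  else if atlas == "TIL" then l
  else l

-- ===== PORT B =====
def pvRenameRules : List (String × String × String) :=
  [ ("PBMC", "Naive Treg", "Naive CD4 T"),
    ("PBMC", "Mature NK", "NK"),
    ("PBMC", "Immature NK", "NK"),
    ("HealthyAdult", "B Lymphocyte", "Immune Cells"),
    ("HealthyAdult", "T Lymphocyte", "Immune Cells"),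
    ("HealthyAdult", "Myeloid / Macrophage", "Immune Cells") ]

-- inner loop: 'for idx, v in enumerate(out): if v == old: out[idx] = new'
def pvApplyRule (out : List String) (old nw : String) : List String :=
  (PySem.List.enumerate out).foldl
    (fun acc p => if p.2 == old then PySem.List.pySetD acc p.1 nw else acc) out

def curate_celltype_names_alt (l : List String) (atlas : String) : List String :=
  let rules := (pvRenameRules.filter (fun r => r.1 == atlas)).map (fun r => (r.2.1, r.2.2))
  if rules.isEmpty then l
  else rules.foldl (fun out r => pvApplyRule out r.1 r.2) l

-- ===== PRECONDITION & SPEC =====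
def Spec_curate_celltype_names (l : List String) (atlas : String) (out : List String) : Prop := out = curate_celltype_names_alt l atlas
instance (l : List String) (atlas : String) (out : List String) : Decidable (Spec_curate_celltype_names l atlas out) := by unfold Spec_curate_celltype_names; infer_instance

-- ===== CLAIM (what is proved, stated in full; the proofs are below) =====
def Claim_equal_curate_celltype_names : Prop := ∀ (l : List String) (atlas : String), Dom_curate_celltype_names l atlas → Spec_curate_celltype_names l atlas (curate_celltype_names l atlas)

-- ===== LEMMAS AND PROOFS =====

-- B's enumerate-and-set loop is elementwise renaming.
theorem applyRule_gen (old nw : String) :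
    ∀ (xs pre : List String),
      (PySem.List.enumerate xs (pre.length : Int)).foldl
        (fun acc p => if p.2 == old then PySem.List.pySetD acc p.1 nw else acc) (pre ++ xs)
      = pre ++ xs.map (fun v => if v == old then nw else v) := by
  intro xs
  induction xs with
  | nil => intro pre; simp [PySem.List.enumerate_nil]
  | cons x t ih =>
    intro pre
    rw [PySem.List.enumerate_cons, List.foldl_cons]
    have hstep : (if x == old then PySem.List.pySetD (pre ++ x :: t) (pre.length : Int) nw
                  else pre ++ x :: t)
        = pre ++ (if x == old then nw else x) :: t := by
      by_cases h : x = old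
      · simp [h]
      · simp [h]
    have hlen : ((pre.length : Int) + 1) = (((pre ++ [if x == old then nw else x]).length : Nat) : Int) := by
      simp
    rw [hstep, hlen]
    have := ih (pre ++ [if x == old then nw else x])
    simpa [List.append_assoc] using this

theorem applyRule_eq_map (xs : List String) (old nw : String) :
    pvApplyRule xs old nw = xs.map (fun v => if v == old then nw else v) := by
  have := applyRule_gen old nw xs []
  simpa [pvApplyRule, PySem.List.enumerate] using this

-- A's HealthyAdult loop appends one element per input element: it is a map.
theorem foldl_append_singleton (f : String → String) (l : List String) (acc : List String) :
    l.foldl (fun a i => a ++ [f i]) acc = acc ++ l.map f := by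
  induction l generalizing acc with
  | nil => simp
  | cons x xs ih => simp [List.foldl, ih]

-- ===== VERDICT (by name: the statement is the Claim_ definition above) =====
theorem curate_celltype_names_spec : Claim_equal_curate_celltype_names := by
  intro l atlas _
  unfold Spec_curate_celltype_names curate_celltype_names curate_celltype_names_alt
  by_cases hp : atlas = "PBMC"
  · subst hp
    have hrules : (pvRenameRules.filter (fun r => r.1 == "PBMC")).map (fun r => (r.2.1, r.2.2))
        = [("Naive Treg", "Naive CD4 T"), ("Mature NK", "NK"), ("Immature NK", "NK")] := by decide
    simp only [beq_self_eq_true, if_true, hrules, List.isEmpty_cons, Bool.false_eq_true,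
      if_false, List.foldl_cons, List.foldl_nil]
    rw [applyRule_eq_map, applyRule_eq_map, applyRule_eq_map]
    simp only [List.map_map]
    apply List.map_congr_left
    intro i _
    by_cases h1 : i = "Naive Treg" <;> by_cases h2 : i = "Mature NK" <;>
      by_cases h3 : i = "Immature NK" <;> simp_all
  · by_cases hh : atlas = "HealthyAdult"
    · subst hh
      have hrules : (pvRenameRules.filter (fun r => r.1 == "HealthyAdult")).map (fun r => (r.2.1, r.2.2))
          = [("B Lymphocyte", "Immune Cells"), ("T Lymphocyte", "Immune Cells"),
             ("Myeloid / Macrophage", "Immune Cells")] := by decide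
      have hne : ("HealthyAdult" == "PBMC") = false := by decide
      simp only [hne, beq_self_eq_true, if_true, hrules, List.isEmpty_cons,
        Bool.false_eq_true, if_false, List.foldl_cons, List.foldl_nil]
      rw [applyRule_eq_map, applyRule_eq_map, applyRule_eq_map]
      have hfold := foldl_append_singleton
        (fun i => if i == "B Lymphocyte" then "Immune Cells"
                  else if i == "T Lymphocyte" then "Immune Cells"
                  else if i == "Myeloid / Macrophage" then "Immune Cells"
                  else i) l []
      simp only [List.nil_append] at hfold
      calc l.foldl (fun curated_major i =>
              if i == "B Lymphocyte" then curated_major ++ ["Immune Cells"]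
              else if i == "T Lymphocyte" then curated_major ++ ["Immune Cells"]
              else if i == "Myeloid / Macrophage" then curated_major ++ ["Immune Cells"]
              else curated_major ++ [i]) []
          = l.map (fun i => if i == "B Lymphocyte" then "Immune Cells"
                  else if i == "T Lymphocyte" then "Immune Cells"
                  else if i == "Myeloid / Macrophage" then "Immune Cells"
                  else i) := by
            rw [← hfold]
            apply PySem.List.foldl_congr_mem
            intro a x _
            by_cases h1 : x = "B Lymphocyte" <;> by_cases h2 : x = "T Lymphocyte" <;>
              by_cases h3 : x = "Myeloid / Macrophage" <;> simp_all
        _ = _ := by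
            simp only [List.map_map]
            apply List.map_congr_left
            intro i _
            by_cases h1 : i = "B Lymphocyte" <;> by_cases h2 : i = "T Lymphocyte" <;>
              by_cases h3 : i = "Myeloid / Macrophage" <;> simp_all
    · have hrules : (pvRenameRules.filter (fun r => r.1 == atlas)).map (fun r => (r.2.1, r.2.2))
          = [] := by
        have e1 : ("PBMC" == atlas) = false := beq_eq_false_iff_ne.mpr (Ne.symm hp)
        have e2 : ("HealthyAdult" == atlas) = false := beq_eq_false_iff_ne.mpr (Ne.symm hh)
        simp [pvRenameRules, List.filter, e1, e2]
      rw [if_neg (by simp [hp]), if_neg (by simp [hh])]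
      simp only [hrules, List.isEmpty_nil, if_true]
      split <;> rfl
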